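-- pv_equiv track=rewrite | github.com/sandra2311-01/PreXP_V1 | get_preprocessing_summary.py | get_preprocessing_summary
-- ===== SOURCE A (Python) =====
-- def get_preprocessing_summary(logs):
--     """
--     Generate a concise summary from preprocessing logs.
--
--     Parameters:
--         logs (list): Preprocessing logs containing step details.
--
--     Returns:
--         dict: A dictionary with steps as keys and summaries as values.
--     """
--     summary = {}
--
--     for log in logs:
--         step = log.get("step", "Unknown Step")
--         column = log.get("column", "General")
--         decision = log.get("decision", "No decision recorded")
--
--         if step not in summary:
--             summary[step] = []
--
--         # Add concise information to the step summary
--         summary[step].append(f"Column '{column}': {decision}")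
--
--     # Format summaries for display
--     formatted_summary = {
--         step: "\n".join(actions)
--         for step, actions in summary.items()
--     }
--
--     return formatted_summary
-- ===== SOURCE B (Python) =====
-- def get_preprocessing_summary(logs):
--     # Stage 1: one map pass to (step, formatted entry) pairs.
--     pairs = [(log.get("step", "Unknown Step"),
--               "Column '{}': {}".format(log.get("column", "General"),
--                                        log.get("decision", "No decision recorded")))
--              for log in logs]
--     # Stage 2: distinct steps in first-seen order.
--     steps = dict.fromkeys(step for step, _ in pairs)
--     # Stage 3: for each step, gather its entries by a scan over the pairs and join.
--     return {s: "\n".join(e for t, e in pairs if t == s) for s in steps}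
-- ===== Notes on version B (the rewrite author's own statement) =====
-- stated objective: alternative
-- what changed: B replaces A's single-pass dict-of-lists accumulation by staged passes: map logs to (step, entry) pairs, dedupe steps in first-seen order, then build each step's summary by filtering the pair list and joining; no mutable per-step accumulator is maintained.
import Mathlib
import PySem

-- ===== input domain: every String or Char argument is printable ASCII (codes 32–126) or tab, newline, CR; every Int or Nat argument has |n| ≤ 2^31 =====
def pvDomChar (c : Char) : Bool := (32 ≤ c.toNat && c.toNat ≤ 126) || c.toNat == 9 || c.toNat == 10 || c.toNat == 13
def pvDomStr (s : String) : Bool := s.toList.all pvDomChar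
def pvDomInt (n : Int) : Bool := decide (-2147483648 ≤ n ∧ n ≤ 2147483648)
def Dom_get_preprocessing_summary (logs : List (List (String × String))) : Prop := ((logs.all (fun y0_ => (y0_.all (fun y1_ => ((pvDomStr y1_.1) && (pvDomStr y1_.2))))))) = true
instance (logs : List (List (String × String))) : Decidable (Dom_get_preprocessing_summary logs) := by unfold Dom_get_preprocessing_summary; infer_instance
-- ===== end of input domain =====

-- B: staged passes (map to (step, entry) pairs, dedupe steps, per-step filter + join) instead of A's single-pass dict-of-lists accumulation; objective: alternative.


-- ===== PORT A =====
-- log.get(key, dflt) on the association-list representation of a dict (lookup = first match)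
def pvDictGet (log : List (String × String)) (k dflt : String) : String :=
  match log.find? (fun p => p.1 == k) with
  | some p => p.2
  | none => dflt

def get_preprocessing_summary (logs : List (List (String × String))) : List (String × String) :=
  let summary : PySem.Dict String (List String) :=
    logs.foldl (fun d log =>
      let step := pvDictGet log "step" "Unknown Step"
      let column := pvDictGet log "column" "General"
      let decision := pvDictGet log "decision" "No decision recorded"
      let d := if d.contains step then d else d.insert step []
      d.modify step [] (fun a => a ++ ["Column '" ++ column ++ "': " ++ decision]))
      PySem.Dict.empty
  summary.items.map (fun p => (p.1, PySem.Str.join "\n" p.2))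

-- ===== PORT B =====
def get_preprocessing_summary_alt (logs : List (List (String × String))) : List (String × String) :=
  let pairs := logs.map (fun log =>
    (pvDictGet log "step" "Unknown Step",
     "Column '" ++ pvDictGet log "column" "General" ++ "': " ++
       pvDictGet log "decision" "No decision recorded"))
  let steps := PySem.List.dedup (pairs.map (fun p => p.1))   -- dict.fromkeys: first occurrences, in order
  steps.map (fun s =>
    (s, PySem.Str.join "\n" ((pairs.filter (fun p => p.1 == s)).map (fun p => p.2))))

-- ===== PRECONDITION & SPEC =====
def Spec_get_preprocessing_summary (logs : List (List (String × String))) (out : List (String × String)) : Prop := out = get_preprocessing_summary_alt logs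
instance (logs : List (List (String × String))) (out : List (String × String)) : Decidable (Spec_get_preprocessing_summary logs out) := by unfold Spec_get_preprocessing_summary; infer_instance

-- ===== CLAIM =====
def Claim_equal_get_preprocessing_summary : Prop := ∀ (logs : List (List (String × String))), Dom_get_preprocessing_summary logs → Spec_get_preprocessing_summary logs (get_preprocessing_summary logs)

-- ===== LEMMAS AND PROOFS =====

def pvToPair (log : List (String × String)) : String × String :=
  (pvDictGet log "step" "Unknown Step",
   "Column '" ++ pvDictGet log "column" "General" ++ "': " ++
     pvDictGet log "decision" "No decision recorded")

-- A's loop body, with the contains-check/insert-[] folded into a single modify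
theorem pv_step_eq (d : PySem.Dict String (List String)) (log : List (String × String)) :
    (let step := pvDictGet log "step" "Unknown Step"
     let column := pvDictGet log "column" "General"
     let decision := pvDictGet log "decision" "No decision recorded"
     let d' := if d.contains step then d else d.insert step []
     d'.modify step [] (fun a => a ++ ["Column '" ++ column ++ "': " ++ decision]))
    = d.modify (pvToPair log).1 [] (fun a => a ++ [(pvToPair log).2]) := by
  by_cases hc : d.contains (pvDictGet log "step" "Unknown Step") = true
  · simp only [hc, if_true, pvToPair]
  · simp only [hc, Bool.false_eq_true, if_false, pvToPair, PySem.Dict.modify,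
      PySem.Dict.getD_insert_self, PySem.Dict.insert_insert_self,
      PySem.Dict.getD_of_not_contains d [] (by simpa using hc), List.nil_append]

theorem pv_fold_eq (logs : List (List (String × String))) :
    logs.foldl (fun d log =>
      let step := pvDictGet log "step" "Unknown Step"
      let column := pvDictGet log "column" "General"
      let decision := pvDictGet log "decision" "No decision recorded"
      let d := if d.contains step then d else d.insert step []
      d.modify step [] (fun a => a ++ ["Column '" ++ column ++ "': " ++ decision]))
      PySem.Dict.empty
    = (logs.map pvToPair).foldl
        (fun d p => d.modify p.1 [] (fun a => a ++ [p.2])) PySem.Dict.empty := by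
  rw [List.foldl_map]
  congr 1
  funext d log
  exact pv_step_eq d log

-- ===== VERDICT =====
theorem get_preprocessing_summary_spec : Claim_equal_get_preprocessing_summary := by
  intro logs _
  unfold Spec_get_preprocessing_summary
  set P := logs.map pvToPair with hP
  set D := P.foldl (fun d p => d.modify p.1 [] (fun a => a ++ [p.2])) PySem.Dict.empty with hD
  have hA : get_preprocessing_summary logs
      = D.items.map (fun p => (p.1, PySem.Str.join "\n" p.2)) := by
    show (logs.foldl _ PySem.Dict.empty).items.map _ = _
    rw [pv_fold_eq]
  have hB : get_preprocessing_summary_alt logs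
      = (PySem.List.dedup (P.map (fun p => p.1))).map (fun s =>
          (s, PySem.Str.join "\n" ((P.filter (fun p => p.1 == s)).map (fun p => p.2)))) := rfl
  have hnd : D.keys.Nodup := by
    rw [hD]
    exact PySem.Dict.nodup_keys_foldl_modify_key P Prod.fst [] (fun _ p a => a ++ [p.2]) _ (by simp)
  have hkeys : D.keys = PySem.List.dedup (P.map (fun p => p.1)) := by
    rw [hD, PySem.Dict.keys_foldl_modify_key P Prod.fst [] (fun _ p a => a ++ [p.2]),
      PySem.List.dedup_eq_ofList]
    simp [PySem.Dict.empty, PySem.Set.update_nil_left]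
  have hgetD : ∀ c, D.getD c [] = (P.filter (fun p => p.1 == c)).map (fun p => p.2) := by
    intro c
    rw [hD, PySem.Dict.getD_foldl_modify_append]
    simp
  rw [hA, hB, PySem.Dict.items_eq_map_keys D hnd [], List.map_map, hkeys]
  apply List.map_congr_left
  intro s _
  simp [Function.comp, hgetD s]
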